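-- pv_equiv track=rewrite | github.com/ComPWA/ampform | expertsystem/ui/system_control.py | calculate_swappings
-- ===== SOURCE A (Python) =====
-- from collections import OrderedDict
--
-- def calculate_swappings(id_mapping):
--     """Calculate edge id swappings.
--
--     Its important to use an ordered dict as the swappings do not commute!
--     """
--     swappings = OrderedDict()
--     for key, value in id_mapping.items():
--         # go through existing swappings and use them
--         newkey = key
--         while newkey in swappings:
--             newkey = swappings[newkey]
--         if value != newkey:
--             swappings[value] = newkey
--     return swappings
-- ===== SOURCE B (Python) =====
-- def calculate_swappings(id_mapping):
--     """Calculate edge id swappings (terminal-memo variant).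
--
--     Keeps a side table `term` mapping every node that has an outgoing
--     swap edge to the terminal of its chain, so resolving a key is a
--     single lookup; inserting an edge relabels the affected ancestors by
--     a reverse breadth-first sweep over the swap edges.
--     """
--     swappings = {}
--     term = {}
--     for key, value in id_mapping.items():
--         t = term.get(key, key)
--         if value != t:
--             swappings[value] = t
--             term[value] = t
--             frontier = [value]
--             while frontier:
--                 frontier = [x for x, y in swappings.items()
--                             if y in frontier and term.get(x) != t]
--                 for x in frontier:
--                     term[x] = t
--     return swappings
-- ===== Notes on version B (the rewrite author's own statement) =====
-- stated objective: alternative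
-- what changed: A resolves each key by walking the swap chain link by link through the output dict; B instead keeps a side table mapping every linked node to its chain terminal, so resolving a key is a single dict lookup, and maintains that table on each insert by a reverse breadth-first relabel sweep over the swap edges.
import Mathlib
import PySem

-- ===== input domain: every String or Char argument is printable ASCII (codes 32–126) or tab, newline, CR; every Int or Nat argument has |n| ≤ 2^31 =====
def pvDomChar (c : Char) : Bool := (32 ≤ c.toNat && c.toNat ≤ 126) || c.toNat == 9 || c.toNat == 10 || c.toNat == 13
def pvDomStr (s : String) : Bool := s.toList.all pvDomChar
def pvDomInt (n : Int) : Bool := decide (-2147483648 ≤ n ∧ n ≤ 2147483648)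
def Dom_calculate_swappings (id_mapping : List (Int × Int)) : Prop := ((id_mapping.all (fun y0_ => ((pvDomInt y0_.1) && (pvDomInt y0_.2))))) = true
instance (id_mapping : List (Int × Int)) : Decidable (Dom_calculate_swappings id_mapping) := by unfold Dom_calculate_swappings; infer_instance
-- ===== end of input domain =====

-- B replaces A's per-key chain walking by a side table `term` holding each node's chain terminal
-- (O(1) resolution per key), maintained by a reverse breadth-first relabel sweep on each insert:
-- an alternative trade-off (work moved from lookups to inserts), same return value.

-- ===== PORT A =====
-- A's `while newkey in swappings: newkey = swappings[newkey]`: the chain visits pairwise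
-- distinct keys of `swappings` (the dict A builds is acyclic: every inserted target is
-- outside the dict at insertion time), so fuel `sw.size + 1` never runs out; exact.
def pvChaseA (sw : PySem.Dict Int Int) : Nat → Int → Int
  | 0, x => x
  | f+1, x =>
    match sw.get? x with
    | none => x
    | some y => pvChaseA sw f y

def calculate_swappings (id_mapping : List (Int × Int)) : List (Int × Int) :=
  (id_mapping.foldl (fun sw kv =>
      let newkey := pvChaseA sw (sw.size + 1) kv.1
      if kv.2 ≠ newkey then sw.insert kv.2 newkey else sw)
    PySem.Dict.empty).items

-- ===== PORT B =====
-- next frontier: `[x for x, y in swappings.items() if y in frontier and term.get(x) != t]`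
def pvFrontierB (sw term : PySem.Dict Int Int) (t : Int) (frontier : List Int) : List Int :=
  (sw.items.filter (fun p => decide (p.2 ∈ frontier ∧ term.get? p.1 ≠ some t))).map (·.1)

-- B's `while frontier:` relabel loop; each productive round labels at least one further key
-- of `swappings` with t, so fuel `sw.size + 2` never runs out; exact.
def pvRelabelB (sw : PySem.Dict Int Int) (t : Int) : Nat → List Int → PySem.Dict Int Int → PySem.Dict Int Int
  | 0, _, term => term
  | f+1, frontier, term =>
    if frontier.isEmpty then term
    else
      let nf := pvFrontierB sw term t frontier
      pvRelabelB sw t f nf (nf.foldl (fun tm x => tm.insert x t) term)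

def calculate_swappings_alt (id_mapping : List (Int × Int)) : List (Int × Int) :=
  (id_mapping.foldl (fun st kv =>
      let t := st.2.getD kv.1 kv.1
      if kv.2 ≠ t then
        let sw := st.1.insert kv.2 t
        (sw, pvRelabelB sw t (sw.size + 2) [kv.2] (st.2.insert kv.2 t))
      else st)
    (PySem.Dict.empty, PySem.Dict.empty)).1.items

-- ===== PRECONDITION & SPEC =====
def Spec_calculate_swappings (id_mapping : List (Int × Int)) (out : List (Int × Int)) : Prop := out = calculate_swappings_alt id_mapping
instance (id_mapping : List (Int × Int)) (out : List (Int × Int)) : Decidable (Spec_calculate_swappings id_mapping out) := by unfold Spec_calculate_swappings; infer_instance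

-- ===== CLAIM (what is proved, stated in full; the proofs are below) =====
def Claim_equal_calculate_swappings : Prop := ∀ (id_mapping : List (Int × Int)), Dom_calculate_swappings id_mapping → Spec_calculate_swappings id_mapping (calculate_swappings id_mapping)

-- ===== LEMMAS AND PROOFS =====

-- the coupled invariant between A's dict and B's (dict, terminal-table) state
def pvInv (sw term : PySem.Dict Int Int) : Prop :=
  sw.keys.Nodup ∧
  (∀ x : Int, (sw.get? x).isSome ↔ (term.get? x).isSome) ∧
  (∀ x y : Int, sw.get? x = some y → term.get? x = some (term.getD y y)) ∧
  (∀ x c : Int, term.get? x = some c → sw.get? c = none) ∧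
  (∀ x : Int, sw.get? (pvChaseA sw (sw.size + 1) x) = none)

-- basic facts about A's chain walk
lemma pv_chase_terminal (sw : PySem.Dict Int Int) (f : Nat) (x : Int)
    (h : sw.get? x = none) : pvChaseA sw f x = x := by
  cases f with
  | zero => rfl
  | succ g => simp [pvChaseA, h]

lemma pv_chase_stable_succ (sw : PySem.Dict Int Int) :
    ∀ (f : Nat) (x : Int), sw.get? (pvChaseA sw f x) = none →
      pvChaseA sw (f + 1) x = pvChaseA sw f x := by
  intro f
  induction f with
  | zero =>
    intro x h
    simp only [pvChaseA] at h ⊢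
    simp [h]
  | succ g ih =>
    intro x h
    cases hx : sw.get? x with
    | none => simp [pvChaseA, hx]
    | some y =>
      simp only [pvChaseA, hx] at h ⊢
      exact ih y h

lemma pv_chase_stable_le (sw : PySem.Dict Int Int) (f g : Nat) (x : Int)
    (hfg : f ≤ g) (h : sw.get? (pvChaseA sw f x) = none) :
    pvChaseA sw g x = pvChaseA sw f x := by
  obtain ⟨k, rfl⟩ := Nat.exists_eq_add_of_le hfg
  clear hfg
  induction k with
  | zero => rfl
  | succ m ih =>
    have h2 : f + (m + 1) = (f + m) + 1 := by omega
    rw [h2, pv_chase_stable_succ sw (f + m) x (by rw [ih]; exact h), ih]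

lemma pv_get?_foldl_insert_const (t : Int) :
    ∀ (l : List Int) (d : PySem.Dict Int Int) (x : Int),
      (l.foldl (fun tm y => tm.insert y t) d).get? x
        = if x ∈ l then some t else d.get? x := by
  intro l
  induction l with
  | nil => intro d x; simp
  | cons a l ih =>
    intro d x
    simp only [List.foldl_cons]
    rw [ih]
    rw [PySem.Dict.get?_insert]
    by_cases hx : x ∈ l
    · simp [hx]
    · by_cases hxa : x = a
      · simp [hxa]
      · simp [hx, hxa]

lemma pv_filter_le {l : List Int} {p q : Int → Bool}
    (hpq : ∀ x ∈ l, q x = true → p x = true) :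
    (l.filter q).length ≤ (l.filter p).length := by
  induction l with
  | nil => simp
  | cons a l ih =>
    have hpq' : ∀ x ∈ l, q x = true → p x = true := fun x hx => hpq x (List.mem_cons_of_mem a hx)
    by_cases hqa : q a = true
    · have hpa : p a = true := hpq a List.mem_cons_self hqa
      rw [List.filter_cons_of_pos hqa, List.filter_cons_of_pos hpa]
      simpa using ih hpq'
    · rw [List.filter_cons_of_neg hqa]
      by_cases hpa : p a = true
      · rw [List.filter_cons_of_pos hpa]
        exact Nat.le_succ_of_le (ih hpq')
      · rw [List.filter_cons_of_neg hpa]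
        exact ih hpq'

lemma pv_filter_lt {l : List Int} {p q : Int → Bool}
    (hpq : ∀ x ∈ l, q x = true → p x = true)
    (x0 : Int) (hx0 : x0 ∈ l) (hp : p x0 = true) (hq : q x0 = false) :
    (l.filter q).length < (l.filter p).length := by
  induction l with
  | nil => cases hx0
  | cons a l ih =>
    have hpq' : ∀ x ∈ l, q x = true → p x = true := fun x hx => hpq x (List.mem_cons_of_mem a hx)
    by_cases hqa : q a = true
    · have hpa : p a = true := hpq a List.mem_cons_self hqa
      have hx0' : x0 ∈ l := by
        rcases List.mem_cons.mp hx0 with rfl | h'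
        · rw [hqa] at hq; cases hq
        · exact h'
      rw [List.filter_cons_of_pos hqa, List.filter_cons_of_pos hpa]
      simpa using ih hpq' hx0'
    · rw [List.filter_cons_of_neg hqa]
      rcases List.mem_cons.mp hx0 with rfl | hx0'
      · rw [List.filter_cons_of_pos hp]
        exact Nat.lt_succ_of_le (pv_filter_le hpq')
      · by_cases hpa : p a = true
        · rw [List.filter_cons_of_pos hpa]
          exact Nat.lt_succ_of_lt (ih hpq' hx0')
        · rw [List.filter_cons_of_neg hpa]
          exact ih hpq' hx0'

lemma pv_relabel_nil (sw : PySem.Dict Int Int) (t : Int) (f : Nat) (tc : PySem.Dict Int Int) :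
    pvRelabelB sw t f [] tc = tc := by
  cases f with
  | zero => rfl
  | succ g => simp [pvRelabelB]


lemma pv_chase_succ_of_get (d : PySem.Dict Int Int) (f : Nat) (x y : Int)
    (h : d.get? x = some y) : pvChaseA d (f + 1) x = pvChaseA d f y := by
  show (match d.get? x with | none => x | some y => pvChaseA d f y) = pvChaseA d f y
  rw [h]

-- chain walks in `sw.insert v t` versus in `sw` (fresh-key insert: fuel grows by one)
lemma pv_chase_insert_fresh (sw : PySem.Dict Int Int) (v t : Int)
    (hv : sw.get? v = none) (ht : sw.get? t = none) (hvt : t ≠ v) :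
    ∀ (f : Nat) (x : Int), sw.get? (pvChaseA sw f x) = none →
      (pvChaseA (sw.insert v t) (f + 1) x = pvChaseA sw f x ∧ pvChaseA sw f x ≠ v)
        ∨ pvChaseA (sw.insert v t) (f + 1) x = t := by
  have ht' : (sw.insert v t).get? t = none := by
    rw [PySem.Dict.get?_insert]; simp [hvt, ht]
  intro f
  induction f with
  | zero =>
    intro x h
    simp only [pvChaseA] at h ⊢
    by_cases hxv : x = v
    · subst hxv
      right
      simp [PySem.Dict.get?_insert_self]
    · left
      constructor
      · rw [PySem.Dict.get?_insert]; simp [hxv, h]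
      · exact hxv
  | succ g ih =>
    intro x h
    by_cases hxv : x = v
    · right
      have hsome : (sw.insert v t).get? x = some t := by
        rw [hxv]; exact PySem.Dict.get?_insert_self _ _ _
      rw [pv_chase_succ_of_get _ _ _ _ hsome]
      exact pv_chase_terminal _ _ _ ht'
    · cases hx : sw.get? x with
      | none =>
        left
        have hx' : (sw.insert v t).get? x = none := by
          rw [PySem.Dict.get?_insert]; simp [hxv, hx]
        rw [pv_chase_terminal _ _ _ hx', pv_chase_terminal _ _ _ hx]
        exact ⟨rfl, hxv⟩
      | some y =>
        have hx' : (sw.insert v t).get? x = some y := by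
          rw [PySem.Dict.get?_insert]; simp [hxv, hx]
        simp only [pvChaseA, hx, hx'] at h ⊢
        exact ih y h

-- chain walks in `sw.insert v t` versus in `sw` (overwrite of an existing key: same fuel)
lemma pv_chase_insert_over (sw : PySem.Dict Int Int) (v t : Int)
    (hv : (sw.get? v).isSome) (ht : sw.get? t = none) (hvt : t ≠ v) :
    ∀ (f : Nat) (x : Int), sw.get? (pvChaseA sw f x) = none →
      (pvChaseA (sw.insert v t) f x = pvChaseA sw f x ∧ pvChaseA sw f x ≠ v)
        ∨ pvChaseA (sw.insert v t) f x = t := by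
  have ht' : (sw.insert v t).get? t = none := by
    rw [PySem.Dict.get?_insert]; simp [hvt, ht]
  intro f
  induction f with
  | zero =>
    intro x h
    simp only [pvChaseA] at h
    have hxv : x ≠ v := by
      intro hh; rw [hh] at h; rw [h] at hv; simp at hv
    exact Or.inl ⟨rfl, hxv⟩
  | succ g ih =>
    intro x h
    by_cases hxv : x = v
    · right
      have hsome : (sw.insert v t).get? x = some t := by
        rw [hxv]; exact PySem.Dict.get?_insert_self _ _ _
      rw [pv_chase_succ_of_get _ _ _ _ hsome]
      exact pv_chase_terminal _ _ _ ht'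
    · cases hx : sw.get? x with
      | none =>
        left
        have hx' : (sw.insert v t).get? x = none := by
          rw [PySem.Dict.get?_insert]; simp [hxv, hx]
        rw [pv_chase_terminal _ _ _ hx', pv_chase_terminal _ _ _ hx]
        exact ⟨rfl, hxv⟩
      | some y =>
        have hx' : (sw.insert v t).get? x = some y := by
          rw [PySem.Dict.get?_insert]; simp [hxv, hx]
        simp only [pvChaseA, hx, hx'] at h ⊢
        exact ih y h

-- every chain in the updated dict still ends at a key outside it, within fuel size+1
lemma pv_RT_insert (sw : PySem.Dict Int Int) (v t : Int)
    (ht : sw.get? t = none) (hvt : t ≠ v)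
    (hRT : ∀ x, sw.get? (pvChaseA sw (sw.size + 1) x) = none) :
    ∀ x, (sw.insert v t).get? (pvChaseA (sw.insert v t) ((sw.insert v t).size + 1) x) = none := by
  have ht' : (sw.insert v t).get? t = none := by
    rw [PySem.Dict.get?_insert]; simp [hvt, ht]
  intro x
  cases hv : sw.get? v with
  | none =>
    have hsz : (sw.insert v t).size = sw.size + 1 := by
      have hc : sw.contains v = false := by
        rw [PySem.Dict.contains_eq_isSome_get?, hv]; rfl
      rw [PySem.Dict.size_insert, hc]; simp
    rw [hsz]
    rcases pv_chase_insert_fresh sw v t hv ht hvt (sw.size + 1) x (hRT x) with ⟨heq, hne⟩ | heq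
    · rw [heq, PySem.Dict.get?_insert]
      simp [hne, hRT x]
    · rw [heq]; exact ht'
  | some w =>
    have hsz : (sw.insert v t).size = sw.size := by
      have hc : sw.contains v = true := by
        rw [PySem.Dict.contains_eq_isSome_get?, hv]; rfl
      rw [PySem.Dict.size_insert, hc]; simp
    rw [hsz]
    rcases pv_chase_insert_over sw v t (by rw [hv]; rfl) ht hvt (sw.size + 1) x (hRT x) with ⟨heq, hne⟩ | heq
    · rw [heq, PySem.Dict.get?_insert]
      simp [hne, hRT x]
    · rw [heq]; exact ht'

-- under the invariant, A's chain walk is B's table lookup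
lemma pv_bridge_aux (sw term : PySem.Dict Int Int) (hInv : pvInv sw term) :
    ∀ (f : Nat) (x : Int), sw.get? (pvChaseA sw f x) = none →
      pvChaseA sw f x = term.getD x x := by
  obtain ⟨-, h2, h3, -, -⟩ := hInv
  intro f
  induction f with
  | zero =>
    intro x h
    simp only [pvChaseA] at h ⊢
    have : term.get? x = none := by
      cases htx : term.get? x with
      | none => rfl
      | some c => have := (h2 x).mpr (by rw [htx]; rfl); rw [h] at this; cases this
    rw [PySem.Dict.getD_eq_get?_getD, this]; rfl
  | succ g ih =>
    intro x h
    cases hx : sw.get? x with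
    | none =>
      simp only [pvChaseA, hx] at h ⊢
      have : term.get? x = none := by
        cases htx : term.get? x with
        | none => rfl
        | some c => have := (h2 x).mpr (by rw [htx]; rfl); rw [hx] at this; cases this
      rw [PySem.Dict.getD_eq_get?_getD, this]; rfl
    | some y =>
      simp only [pvChaseA, hx] at h ⊢
      rw [ih y h]
      have := h3 x y hx
      rw [PySem.Dict.getD_eq_get?_getD term x, this]; rfl

lemma pv_bridge (sw term : PySem.Dict Int Int) (hInv : pvInv sw term) (x : Int) :
    pvChaseA sw (sw.size + 1) x = term.getD x x :=
  pv_bridge_aux sw term hInv (sw.size + 1) x (hInv.2.2.2.2 x)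

-- one chain step keeps the (full-fuel) chain end
lemma pv_chase_step (sw : PySem.Dict Int Int)
    (hRT : ∀ z, sw.get? (pvChaseA sw (sw.size + 1) z) = none)
    (x y : Int) (hxy : sw.get? x = some y) :
    pvChaseA sw (sw.size + 1) x = pvChaseA sw (sw.size + 1) y := by
  have h1 : pvChaseA sw (sw.size + 1) x = pvChaseA sw sw.size y := by
    simp [pvChaseA, hxy]
  have hterm : sw.get? (pvChaseA sw sw.size y) = none := by
    rw [← h1]; exact hRT x
  rw [h1, pv_chase_stable_succ sw sw.size y hterm]

-- the relabel-loop invariant: tc agrees with term1 except for keys already relabelled to t,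
-- every t-labelled key's chain ends in t, frontier keys are t-labelled, and every edge into a
-- t-labelled key outside the frontier has a t-labelled source
def pvLI (sw' : PySem.Dict Int Int) (t v : Int) (term1 : PySem.Dict Int Int)
    (frontier : List Int) (tc : PySem.Dict Int Int) : Prop :=
  (∀ x : Int, (tc.get? x).isSome ↔ (sw'.get? x).isSome) ∧
  (∀ x ∈ frontier, tc.get? x = some t) ∧
  (∀ x : Int, tc.get? x = some t → pvChaseA sw' (sw'.size + 1) x = t) ∧
  (∀ x : Int, tc.get? x ≠ some t → tc.get? x = term1.get? x) ∧
  (∀ x y : Int, sw'.get? x = some y → tc.get? y = some t → y ∉ frontier → tc.get? x = some t) ∧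
  tc.get? v = some t

-- what the finished relabel loop guarantees
def pvQ (sw' : PySem.Dict Int Int) (t v : Int) (term1 : PySem.Dict Int Int)
    (tc : PySem.Dict Int Int) : Prop :=
  (∀ x : Int, (tc.get? x).isSome ↔ (sw'.get? x).isSome) ∧
  (∀ x : Int, tc.get? x = some t → pvChaseA sw' (sw'.size + 1) x = t) ∧
  (∀ x : Int, tc.get? x ≠ some t → tc.get? x = term1.get? x) ∧
  (∀ x y : Int, sw'.get? x = some y → tc.get? y = some t → tc.get? x = some t) ∧
  tc.get? v = some t

def pvCount (sw' tc : PySem.Dict Int Int) (t : Int) : Nat :=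
  (sw'.keys.filter (fun x => decide (tc.get? x ≠ some t))).length

lemma pv_mem_frontierB (sw' tc : PySem.Dict Int Int) (t : Int) (frontier : List Int)
    (hnd : sw'.keys.Nodup) (x : Int) :
    x ∈ pvFrontierB sw' tc t frontier
      ↔ ∃ y, sw'.get? x = some y ∧ y ∈ frontier ∧ tc.get? x ≠ some t := by
  unfold pvFrontierB
  constructor
  · intro hx
    rcases List.mem_map.mp hx with ⟨p, hp, rfl⟩
    rcases List.mem_filter.mp hp with ⟨hpm, hcond⟩
    have hc := of_decide_eq_true hcond
    refine ⟨p.2, ?_, hc.1, hc.2⟩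
    exact (PySem.Dict.get?_eq_some_iff_mem_items _ _ _ hnd).mpr (by rw [Prod.mk.eta]; exact hpm)
  · rintro ⟨y, hxy, hyf, hxt⟩
    apply List.mem_map.mpr
    refine ⟨(x, y), List.mem_filter.mpr ⟨PySem.Dict.mem_items_of_get?_eq_some _ hxy, decide_eq_true ⟨hyf, hxt⟩⟩, rfl⟩

lemma pv_mem_keys_of_get? (d : PySem.Dict Int Int) (x : Int) (h : (d.get? x).isSome) :
    x ∈ d.keys := by
  rw [← PySem.Dict.contains_iff_mem_keys, PySem.Dict.contains_eq_isSome_get?, h]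

lemma pv_relabel_spec (sw' : PySem.Dict Int Int) (t v : Int) (term1 : PySem.Dict Int Int)
    (hnd : sw'.keys.Nodup)
    (hRT : ∀ z, sw'.get? (pvChaseA sw' (sw'.size + 1) z) = none) :
    ∀ (fuel : Nat) (frontier : List Int) (tc : PySem.Dict Int Int),
      pvLI sw' t v term1 frontier tc → pvCount sw' tc t < fuel →
      pvQ sw' t v term1 (pvRelabelB sw' t fuel frontier tc) := by
  intro fuel
  induction fuel with
  | zero => intro _ _ _ h; omega
  | succ f ih =>
    intro frontier tc hLI hcount
    obtain ⟨hL1, hL2, hL3, hL4, hL5, hL8⟩ := hLI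
    simp only [pvRelabelB]
    by_cases hfe : frontier.isEmpty
    · have hfnil : frontier = [] := List.isEmpty_iff.mp hfe
      simp only [hfe, if_true]
      exact ⟨hL1, hL3, hL4,
        fun x y hxy hty => hL5 x y hxy hty (by rw [hfnil]; simp), hL8⟩
    · simp only [hfe, Bool.false_eq_true, if_false]
      set nf := pvFrontierB sw' tc t frontier with hnf_def
      set tc' := nf.foldl (fun tm x => tm.insert x t) tc with htc'_def
      have htc' : ∀ x, tc'.get? x = if x ∈ nf then some t else tc.get? x := by
        intro x; rw [htc'_def, pv_get?_foldl_insert_const]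
      have hmono : ∀ x, tc.get? x = some t → tc'.get? x = some t := by
        intro x hx; rw [htc' x]; by_cases h : x ∈ nf <;> simp [h, hx]
      have hmemnf := pv_mem_frontierB sw' tc t frontier hnd
      by_cases hnfnil : nf = []
      · have htceq : tc' = tc := by rw [htc'_def, hnfnil]; rfl
        rw [hnfnil, pv_relabel_nil, htceq]
        refine ⟨hL1, hL3, hL4, ?_, hL8⟩
        intro x y hxy hty
        by_cases hyf : y ∈ frontier
        · by_cases htx : tc.get? x = some t
          · exact htx
          · exfalso
            have : x ∈ nf := (hmemnf x).mpr ⟨y, hxy, hyf, htx⟩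
            rw [hnfnil] at this
            exact List.not_mem_nil this
        · exact hL5 x y hxy hty hyf
      · -- productive round: apply the induction hypothesis
        apply ih
        · refine ⟨?_, ?_, ?_, ?_, ?_, hmono v hL8⟩
          · intro x
            rw [htc' x]
            by_cases hx : x ∈ nf
            · simp only [hx, if_true]
              obtain ⟨y, hxy, -, -⟩ := (hmemnf x).mp hx
              simp [hxy]
            · simp only [hx, if_false]; exact hL1 x
          · intro x hx
            rw [htc' x]; simp [hx]
          · intro x hx
            rw [htc' x] at hx
            by_cases hxm : x ∈ nf
            · obtain ⟨y, hxy, hyf, -⟩ := (hmemnf x).mp hxm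
              rw [pv_chase_step sw' hRT x y hxy]
              exact hL3 y (hL2 y hyf)
            · rw [if_neg hxm] at hx
              exact hL3 x hx
          · intro x hx
            have hxm : x ∉ nf := by
              intro hmem; rw [htc' x, if_pos hmem] at hx; exact hx rfl
            rw [htc' x, if_neg hxm] at hx ⊢
            exact hL4 x hx
          · intro x y hxy hty hynf
            have htyold : tc.get? y = some t := by
              rw [htc' y, if_neg hynf] at hty; exact hty
            by_cases hyf : y ∈ frontier
            · by_cases htx : tc.get? x = some t
              · exact hmono x htx
              · have : x ∈ nf := (hmemnf x).mpr ⟨y, hxy, hyf, htx⟩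
                rw [htc' x, if_pos this]
            · exact hmono x (hL5 x y hxy htyold hyf)
        · -- the count of not-yet-t keys strictly drops
          obtain ⟨x0, hx0⟩ := List.exists_mem_of_ne_nil nf hnfnil
          obtain ⟨y0, hx0y, -, hx0t⟩ := (hmemnf x0).mp hx0
          have hx0k : x0 ∈ sw'.keys := pv_mem_keys_of_get? sw' x0 (by rw [hx0y]; rfl)
          have hlt : pvCount sw' tc' t < pvCount sw' tc t := by
            apply pv_filter_lt (x0 := x0)
            · intro x hxk hq
              have hq' := of_decide_eq_true hq
              apply decide_eq_true
              intro hcontr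
              exact hq' (hmono x hcontr)
            · exact hx0k
            · exact decide_eq_true hx0t
            · have : tc'.get? x0 = some t := by rw [htc' x0, if_pos hx0]
              simp [this]
          omega

-- proof-side names for the two fold bodies
def pvStepA (sw : PySem.Dict Int Int) (kv : Int × Int) : PySem.Dict Int Int :=
  let newkey := pvChaseA sw (sw.size + 1) kv.1
  if kv.2 ≠ newkey then sw.insert kv.2 newkey else sw

def pvStepB (st : PySem.Dict Int Int × PySem.Dict Int Int) (kv : Int × Int) :
    PySem.Dict Int Int × PySem.Dict Int Int :=
  let t := st.2.getD kv.1 kv.1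
  if kv.2 ≠ t then
    let sw := st.1.insert kv.2 t
    (sw, pvRelabelB sw t (sw.size + 2) [kv.2] (st.2.insert kv.2 t))
  else st

lemma pv_calcA_eq (l : List (Int × Int)) :
    calculate_swappings l = (l.foldl pvStepA PySem.Dict.empty).items := rfl

lemma pv_calcB_eq (l : List (Int × Int)) :
    calculate_swappings_alt l = (l.foldl pvStepB (PySem.Dict.empty, PySem.Dict.empty)).1.items := rfl

-- chains of keys never relabelled to t are untouched by the insert
lemma pv_chase_untouched (sw : PySem.Dict Int Int) (v t : Int) (tc : PySem.Dict Int Int)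
    (hQ4 : ∀ x y : Int, (sw.insert v t).get? x = some y → tc.get? y = some t → tc.get? x = some t)
    (hQ5 : tc.get? v = some t) :
    ∀ (f : Nat) (x : Int), tc.get? x ≠ some t →
      pvChaseA (sw.insert v t) f x = pvChaseA sw f x := by
  intro f
  induction f with
  | zero => intro x _; rfl
  | succ g ih =>
    intro x hx
    have hxv : x ≠ v := fun h => hx (h ▸ hQ5)
    cases hsx : sw.get? x with
    | none =>
      have hsx' : (sw.insert v t).get? x = none := by
        rw [PySem.Dict.get?_insert]; simp [hxv, hsx]
      rw [pv_chase_terminal _ _ _ hsx', pv_chase_terminal _ _ _ hsx]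
    | some y =>
      have hsx' : (sw.insert v t).get? x = some y := by
        rw [PySem.Dict.get?_insert]; simp [hxv, hsx]
      have hy : tc.get? y ≠ some t := fun hyt => hx (hQ4 x y hsx' hyt)
      rw [pv_chase_succ_of_get _ _ _ _ hsx', pv_chase_succ_of_get _ _ _ _ hsx, ih y hy]

-- one processed item: A's dict and B's dict stay equal and the invariant survives
lemma pv_step (sw term : PySem.Dict Int Int) (hInv : pvInv sw term) (kv : Int × Int) :
    pvStepA sw kv = (pvStepB (sw, term) kv).1 ∧
      pvInv (pvStepA sw kv) (pvStepB (sw, term) kv).2 := by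
  obtain ⟨k, v⟩ := kv
  obtain ⟨hnd, h2, h3, h4, h5⟩ := hInv
  have hbr : pvChaseA sw (sw.size + 1) k = term.getD k k :=
    pv_bridge sw term ⟨hnd, h2, h3, h4, h5⟩ k
  by_cases hv : v = term.getD k k
  · constructor
    · simp [pvStepA, pvStepB, hbr, hv]
    · simp only [pvStepA, pvStepB, hbr, hv]
      simp only [ne_eq, not_true_eq_false, if_false]
      exact ⟨hnd, h2, h3, h4, h5⟩
  · -- the insert branch
    have hAeq : pvStepA sw (k, v) = sw.insert v (term.getD k k) := by
      simp [pvStepA, hbr, hv]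
    have hBeq : pvStepB (sw, term) (k, v) =
        (sw.insert v (term.getD k k),
          pvRelabelB (sw.insert v (term.getD k k)) (term.getD k k)
            ((sw.insert v (term.getD k k)).size + 2) [v] (term.insert v (term.getD k k))) := by
      simp [pvStepB, hv]
    rw [hAeq, hBeq]
    generalize htt : term.getD k k = t at hbr hv
    set sw' := sw.insert v t with hsw'
    have ht_none : sw.get? t = none := by
      cases htk : term.get? k with
      | some c =>
        have hc : t = c := by rw [← htt, PySem.Dict.getD_eq_get?_getD, htk]; rfl
        rw [hc]; exact h4 k c htk
      | none =>
        have hteq : t = k := by rw [← htt, PySem.Dict.getD_eq_get?_getD, htk]; rfl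
        rw [hteq]
        cases hsk : sw.get? k with
        | none => rfl
        | some w =>
          have hcontra := (h2 k).mp (by rw [hsk]; rfl)
          rw [htk] at hcontra; cases hcontra
    have hvt' : t ≠ v := fun h => hv h.symm
    have hnd' : sw'.keys.Nodup := PySem.Dict.nodup_keys_insert _ _ _ hnd
    have hRT' := pv_RT_insert sw v t ht_none hvt' h5
    have ht'_none : sw'.get? t = none := by
      rw [hsw', PySem.Dict.get?_insert]; simp [hvt', ht_none]
    have hsz_ge : sw.size ≤ sw'.size := by
      rw [hsw', PySem.Dict.size_insert]
      by_cases hc : sw.contains v = true <;> simp [hc]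
    -- initial loop invariant
    have hLI : pvLI sw' t v (term.insert v t) [v] (term.insert v t) := by
      refine ⟨?_, ?_, ?_, fun x _ => rfl, ?_, PySem.Dict.get?_insert_self _ _ _⟩
      · intro x
        rw [hsw', PySem.Dict.get?_insert, PySem.Dict.get?_insert]
        by_cases hx : x = v
        · simp [hx]
        · simp only [hx, if_false]; exact (h2 x).symm
      · intro x hx
        rcases List.mem_singleton.mp hx with rfl
        exact PySem.Dict.get?_insert_self _ _ _
      · intro x hx
        by_cases hxv : x = v
        · have hvs : sw'.get? x = some t := by
            rw [hxv, hsw']; exact PySem.Dict.get?_insert_self _ _ _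
          rw [pv_chase_succ_of_get _ _ _ _ hvs]
          exact pv_chase_terminal _ _ _ ht'_none
        · rw [PySem.Dict.get?_insert, if_neg hxv] at hx
          have hold : pvChaseA sw (sw.size + 1) x = t := by
            rw [pv_bridge sw term ⟨hnd, h2, h3, h4, h5⟩ x,
              PySem.Dict.getD_eq_get?_getD, hx]; rfl
          cases hswv : sw.get? v with
          | none =>
            have hsz : sw'.size = sw.size + 1 := by
              rw [hsw', PySem.Dict.size_insert]
              have hcf : sw.contains v = false := by
                rw [PySem.Dict.contains_eq_isSome_get?, hswv]; rfl
              simp [hcf]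
            rw [hsz]
            rcases pv_chase_insert_fresh sw v t hswv ht_none hvt' (sw.size + 1) x (h5 x)
              with ⟨heq, -⟩ | heq
            · rw [hsw', heq, hold]
            · rw [hsw', heq]
          | some w =>
            have hsz : sw'.size = sw.size := by
              rw [hsw', PySem.Dict.size_insert]
              have hct : sw.contains v = true := by
                rw [PySem.Dict.contains_eq_isSome_get?, hswv]; rfl
              simp [hct]
            rw [hsz]
            rcases pv_chase_insert_over sw v t (by rw [hswv]; rfl) ht_none hvt' (sw.size + 1) x (h5 x)
              with ⟨heq, -⟩ | heq
            · rw [hsw', heq, hold]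
            · rw [hsw', heq]
      · intro x y hxy hyt hynv
        have hyv : y ≠ v := fun h => hynv (h ▸ List.mem_singleton_self _)
        rw [PySem.Dict.get?_insert, if_neg hyv] at hyt
        by_cases hxv : x = v
        · rw [hxv]; exact PySem.Dict.get?_insert_self _ _ _
        · rw [hsw', PySem.Dict.get?_insert, if_neg hxv] at hxy
          rw [PySem.Dict.get?_insert, if_neg hxv]
          rw [h3 x y hxy, PySem.Dict.getD_eq_get?_getD, hyt]; rfl
    have hcount : pvCount sw' (term.insert v t) t < sw'.size + 2 := by
      have hle : pvCount sw' (term.insert v t) t ≤ sw'.keys.length :=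
        List.Sublist.length_le List.filter_sublist
      have hkl : sw'.keys.length = sw'.size := by
        simp [PySem.Dict.keys, PySem.Dict.size]
      omega
    have hQ := pv_relabel_spec sw' t v (term.insert v t) hnd' hRT'
      (sw'.size + 2) [v] (term.insert v t) hLI hcount
    obtain ⟨hQ1, hQ2, hQ3, hQ4, hQ5⟩ := hQ
    set term'' := pvRelabelB sw' t (sw'.size + 2) [v] (term.insert v t) with hterm''
    -- the relabelled table is exactly the chain-end map of sw'
    have hP2 : ∀ x : Int, term''.getD x x = pvChaseA sw' (sw'.size + 1) x := by
      intro x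
      rw [PySem.Dict.getD_eq_get?_getD]
      cases hx : term''.get? x with
      | none =>
        have hswx : sw'.get? x = none := by
          cases hc : sw'.get? x with
          | none => rfl
          | some w =>
            have hcontra := (hQ1 x).mpr (by rw [hc]; rfl)
            rw [hx] at hcontra; cases hcontra
        rw [pv_chase_terminal _ _ _ hswx]; rfl
      | some c =>
        by_cases hct : c = t
        · rw [hct]
          exact (hQ2 x (by rw [hx, hct])).symm
        · have hne : term''.get? x ≠ some t := by
            rw [hx]; intro hcc; injection hcc with hcc; exact hct hcc
          have hxt1 : (term.insert v t).get? x = some c := by rw [← hQ3 x hne, hx]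
          have hxv : x ≠ v := by
            intro hxv
            rw [hxv, PySem.Dict.get?_insert_self] at hxt1
            injection hxt1 with hcc; exact hct hcc.symm
          rw [PySem.Dict.get?_insert, if_neg hxv] at hxt1
          have hold : pvChaseA sw (sw.size + 1) x = c := by
            rw [pv_bridge sw term ⟨hnd, h2, h3, h4, h5⟩ x,
              PySem.Dict.getD_eq_get?_getD, hxt1]; rfl
          have huntouched := pv_chase_untouched sw v t term'' hQ4 hQ5 (sw'.size + 1) x hne
          rw [← hsw'] at huntouched
          rw [huntouched,
            pv_chase_stable_le sw (sw.size + 1) (sw'.size + 1) x (by omega) (h5 x), hold]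
          rfl
    refine ⟨rfl, hnd', fun x => (hQ1 x).symm, ?_, ?_, hRT'⟩
    · intro x y hxy
      have hxs : (term''.get? x).isSome := (hQ1 x).mpr (by rw [hxy]; rfl)
      obtain ⟨c, hc⟩ := Option.isSome_iff_exists.mp hxs
      rw [hc]
      have hcx : c = term''.getD x x := by rw [PySem.Dict.getD_eq_get?_getD, hc]; rfl
      rw [hcx, hP2 x, pv_chase_step sw' hRT' x y hxy, ← hP2 y]
    · intro x c hc
      have hcx : c = term''.getD x x := by rw [PySem.Dict.getD_eq_get?_getD, hc]; rfl
      rw [hcx, hP2 x]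
      exact hRT' x

lemma pv_fold (l : List (Int × Int)) : ∀ (sw term : PySem.Dict Int Int), pvInv sw term →
    l.foldl pvStepA sw = (l.foldl pvStepB (sw, term)).1 ∧
      pvInv (l.foldl pvStepA sw) (l.foldl pvStepB (sw, term)).2 := by
  induction l with
  | nil => intro sw term hInv; exact ⟨rfl, hInv⟩
  | cons kv l ih =>
    intro sw term hInv
    have h := pv_step sw term hInv kv
    have h' := ih (pvStepB (sw, term) kv).1 (pvStepB (sw, term) kv).2 (h.1 ▸ h.2)
    simpa [List.foldl_cons, h.1] using h'

lemma pv_inv_empty : pvInv (PySem.Dict.empty : PySem.Dict Int Int) PySem.Dict.empty := by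
  refine ⟨PySem.Dict.nodup_keys_empty, ?_, ?_, ?_, ?_⟩
  · intro x; simp [PySem.Dict.get?_empty]
  · intro x y h; rw [PySem.Dict.get?_empty] at h; cases h
  · intro x c h; rw [PySem.Dict.get?_empty] at h; cases h
  · intro x
    rw [pv_chase_terminal _ _ _ (PySem.Dict.get?_empty x)]
    exact PySem.Dict.get?_empty x

-- ===== VERDICT (by name: the statement is the Claim_ definition above) =====
theorem calculate_swappings_spec : Claim_equal_calculate_swappings := by
  intro l _
  unfold Spec_calculate_swappings
  rw [pv_calcA_eq, pv_calcB_eq, (pv_fold l PySem.Dict.empty PySem.Dict.empty pv_inv_empty).1]
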